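-- pv_equiv track=rewrite | github.com/CaioMM/checkPriceKaBuM | checkLib.py | check3090
-- ===== SOURCE A (Python) =====
-- def check3090(data):
-- 	code = ['3','0','9','0','*']
-- 	nome = data['nome'].replace(" ","").replace(",","")
-- 	hit = 0
-- 	for letra in nome:
-- 		if letra.upper() == code[0]:
-- 			code.pop(0)
-- 			hit += 1
-- 		elif hit != 0:
-- 			break
-- 	return (len(code)==1)
-- ===== SOURCE B (Python) =====
-- def check3090(data):
--     # Find the first '3' in the cleaned name and require '090' to follow it.
--     nome = data['nome'].replace(" ", "").replace(",", "")
--     idx = nome.find('3')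
--     return idx != -1 and nome[idx:idx+4] == '3090'
-- ===== Notes on version B (the rewrite author's own statement) =====
-- stated objective: simpler
-- what changed: Replaces the character-by-character pop/hit state machine over a mutable code list with a single find('3') plus a fixed-length slice comparison.
-- intended difference: On names whose cleaned form ends exactly with its first '3' followed by '090*', A returns False because its leftover '*' sentinel is also consumed from the code list, while B returns True, which is intended since the name does contain the 3090 match A is looking for. — e.g. on check3090([("nome", "3090*")]): A returns false, B returns true
import Mathlib
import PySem

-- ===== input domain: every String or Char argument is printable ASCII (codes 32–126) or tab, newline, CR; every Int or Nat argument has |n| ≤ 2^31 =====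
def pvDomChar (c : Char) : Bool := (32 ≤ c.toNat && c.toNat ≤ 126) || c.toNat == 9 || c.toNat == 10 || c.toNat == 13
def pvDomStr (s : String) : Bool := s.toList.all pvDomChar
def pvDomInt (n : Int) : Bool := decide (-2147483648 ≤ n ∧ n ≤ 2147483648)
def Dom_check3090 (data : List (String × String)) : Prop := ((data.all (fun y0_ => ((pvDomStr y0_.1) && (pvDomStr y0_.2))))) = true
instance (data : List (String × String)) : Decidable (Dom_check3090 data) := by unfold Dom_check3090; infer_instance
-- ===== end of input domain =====

-- B replaces A's pop/hit state machine with find('3') plus a fixed-length slice comparison (objective: simpler);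
-- A = B outside D_ (the '3090*'-suffix corner, where A's leftover '*' sentinel makes it return False and B returns True).

-- ===== PORT A =====
-- the for-loop over nome: state = (remaining code list, hit); none = IndexError (code[0] on the emptied list)
def loopA : List Char → List Char → Nat → Option (List Char)
  | [], code, _ => some code
  | c :: cs, code, hit =>
    match code with
    | [] => none
    | k :: rest =>
      if PySem.Chars.upperChar c == k then loopA cs rest (hit + 1)
      else if hit ≠ 0 then some (k :: rest)
      else loopA cs (k :: rest) hit

-- the function body once data['nome'] has been looked up
def bodyA (raw : String) : Bool :=
  let nome := PySem.Str.replace (PySem.Str.replace raw " " "") "," ""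
  match loopA nome.toList ['3', '0', '9', '0', '*'] 0 with
  | none => false  -- IndexError in Python; excluded by Pre_
  | some code => code.length == 1

def check3090 (data : List (String × String)) : Bool :=
  match PySem.Dict.get? (PySem.Dict.mk data) "nome" with
  | none => false  -- KeyError in Python; excluded by Pre_
  | some raw => bodyA raw

-- ===== PORT B =====
-- the function body once data['nome'] has been looked up
def bodyB (raw : String) : Bool :=
  let nome := PySem.Str.replace (PySem.Str.replace raw " " "") "," ""
  let idx := PySem.Str.find nome "3"
  idx != -1 && (PySem.Str.slice nome (some idx) (some (idx + 4)) == "3090")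

def check3090_alt (data : List (String × String)) : Bool :=
  match PySem.Dict.get? (PySem.Dict.mk data) "nome" with
  | none => false  -- KeyError in Python; excluded by Pre_
  | some raw => bodyB raw

-- ===== PRECONDITION & SPEC =====
-- the cleaned name from its first '3' on (input inspection only; used by Pre_/Raises_/D_)
def pvTail3 (raw : String) : List Char :=
  ((PySem.Str.replace (PySem.Str.replace raw " " "") "," "").toList).dropWhile (· ≠ '3')

def pvNome (data : List (String × String)) : Option String :=
  PySem.Dict.get? (PySem.Dict.mk data) "nome"

-- Pre_ excludes exactly the inputs where Python A raises: a missing 'nome' key (KeyError), and names whose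
-- cleaned form has its first '3' followed by '090*' with at least one more character after it (IndexError).
def Pre_check3090 (data : List (String × String)) : Prop :=
  (pvNome data).isSome = true ∧
  ¬ ((pvTail3 ((pvNome data).getD "")).take 5 = ['3', '0', '9', '0', '*'] ∧
      5 < (pvTail3 ((pvNome data).getD "")).length)
instance (data : List (String × String)) : Decidable (Pre_check3090 data) := by
  unfold Pre_check3090; infer_instance

def pvWitness_check3090 : (List (String × String)) := [("nome", "rtx 3090 ti")]

-- On names whose cleaned form ends exactly with its first '3' followed by '090*', A returns False (its
-- leftover '*' sentinel is also consumed from the code list) while B returns True, which is intended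
-- since such a name does contain the '3090' match A is looking for.
def D_check3090 (data : List (String × String)) : Prop :=
  (pvNome data).isSome = true ∧ pvTail3 ((pvNome data).getD "") = ['3', '0', '9', '0', '*']
instance (data : List (String × String)) : Decidable (D_check3090 data) := by
  unfold D_check3090; infer_instance

def Spec_check3090 (data : List (String × String)) (out : Bool) : Prop :=
  ¬ D_check3090 data → out = check3090_alt data
instance (data : List (String × String)) (out : Bool) : Decidable (Spec_check3090 data out) := by
  unfold Spec_check3090; infer_instance

def pvDiffWitness_check3090 : (List (String × String)) := [("nome", "3090*")]
def pvDiffWitnessOut_check3090 : Bool × Bool := (false, true)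

-- ===== CLAIM (what is proved, stated in full; the proofs are below) =====
def Claim_unchanged_check3090 : Prop := ∀ (data : List (String × String)), Dom_check3090 data → Pre_check3090 data → Spec_check3090 data (check3090 data)
def Claim_changed_check3090 : Prop := Dom_check3090 (pvDiffWitness_check3090) ∧ Pre_check3090 (pvDiffWitness_check3090) ∧ D_check3090 (pvDiffWitness_check3090) ∧ check3090 (pvDiffWitness_check3090) = pvDiffWitnessOut_check3090.1 ∧ check3090_alt (pvDiffWitness_check3090) = pvDiffWitnessOut_check3090.2 ∧ pvDiffWitnessOut_check3090.1 ≠ pvDiffWitnessOut_check3090.2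
def Claim_exact_check3090 : Prop := ∀ (data : List (String × String)), Dom_check3090 data → Pre_check3090 data → D_check3090 data → check3090 data ≠ check3090_alt data

-- ===== LEMMAS AND PROOFS =====

-- upperChar is the identity on targets below 'A' (digits, '*')
lemma upperChar_eq_iff (c d : Char) (hd : d.toNat < 65) :
    PySem.Chars.upperChar c = d ↔ c = d := by
  unfold PySem.Chars.upperChar PySem.Chars.islower
  split
  · next h =>
    simp only [Bool.and_eq_true, decide_eq_true_eq] at h
    have h1 : 97 ≤ c.toNat := h.1
    have h2 : c.toNat ≤ 122 := h.2
    have hv : (Char.ofNat (c.toNat - 32)).toNat = c.toNat - 32 := by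
      rw [Char.toNat_ofNat, if_pos]; simp [Nat.isValidChar]; omega
    constructor
    · intro he
      have := congrArg Char.toNat he
      rw [hv] at this; omega
    · intro he
      subst he; omega
  · exact Iff.rfl

-- while hit = 0, every character other than '3' is skipped
lemma loopA_skip (l : List Char) :
    loopA l ['3', '0', '9', '0', '*'] 0 = loopA (l.dropWhile (· ≠ '3')) ['3', '0', '9', '0', '*'] 0 := by
  induction l with
  | nil => rfl
  | cons c cs ih =>
    by_cases hc : c = '3'
    · simp [List.dropWhile, hc]
    · have h3 : ¬ (PySem.Chars.upperChar c = '3') := by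
        rw [upperChar_eq_iff c '3' (by decide)]; exact hc
      simp [loopA, List.dropWhile, hc, h3, ih]

lemma prefix_single_iff (l : List Char) (c : Char) : [c] <+: l ↔ l.head? = some c := by
  cases l with
  | nil => simp
  | cons a t =>
    constructor
    · rintro ⟨u, hu⟩; cases hu; simp
    · intro h; simp at h; exact ⟨t, by simp [h]⟩

-- nome.find('3') is the length of the '3'-free prefix
lemma find3_eq (l : List Char) (h : '3' ∈ l) :
    PySem.Chars.find l ['3'] = ((l.takeWhile (· ≠ '3')).length : Int) := by
  have hinf : ['3'] <:+: l := (List.singleton_infix_iff _ _).mpr h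
  have h0 : 0 ≤ PySem.Chars.find l ['3'] := (PySem.Chars.find_nonneg_iff l ['3']).mpr hinf
  obtain ⟨hpre, hmin⟩ := PySem.Chars.find_spec h0
  set k := (l.takeWhile (· ≠ '3')).length with hk
  set j := (PySem.Chars.find l ['3']).toNat with hj
  have hdropk : l.drop k = l.dropWhile (· ≠ '3') := by
    conv_lhs => rw [← List.takeWhile_append_dropWhile (p := (· ≠ '3')) (l := l)]
    rw [List.drop_left]
  have hnil : l.dropWhile (· ≠ '3') ≠ [] := by
    intro hnil
    have := List.dropWhile_eq_nil_iff.mp hnil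
    simp at this
    exact this '3' h rfl
  have hhead : (l.dropWhile (· ≠ '3')).head? = some '3' := by
    have h2 := List.head?_dropWhile_not (fun x => x ≠ '3') l
    cases hh : (l.dropWhile (fun x => x ≠ '3')).head? with
    | none => exact absurd (List.head?_eq_none_iff.mp hh) hnil
    | some x =>
      rw [hh] at h2
      simp at h2
      simp [h2]
  have hprek : [('3' : Char)] <+: l.drop k := by
    rw [prefix_single_iff, hdropk]; exact hhead
  have hjk : j ≤ k := by
    by_contra hlt
    exact hmin k (by omega) hprek
  have hkj : k ≤ j := by
    by_contra hlt
    push Not at hlt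
    have hpj := (prefix_single_iff _ _).mp hpre
    rw [List.head?_drop] at hpj
    have hjlen : j < l.length := by
      by_contra hge
      push Not at hge
      rw [List.getElem?_eq_none hge] at hpj
      simp at hpj
    have hgl : l[j] = '3' := by
      have := List.getElem?_eq_getElem hjlen
      rw [this] at hpj; exact Option.some.inj hpj
    have htw : (l.takeWhile (· ≠ '3'))[j]'hlt = l[j]'hjlen :=
      List.IsPrefix.getElem (List.takeWhile_prefix _) hlt
    have hmem : (l.takeWhile (· ≠ '3'))[j]'hlt ∈ l.takeWhile (· ≠ '3') := List.getElem_mem hlt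
    have := List.mem_takeWhile_imp hmem
    rw [htw, hgl] at this
    simp at this
  have : j = k := le_antisymm hjk hkj
  omega

-- what A's loop yields, as a predicate on the cleaned name from its first '3' on
lemma bodyA_result (raw : String)
    (hr : ¬ ((((PySem.Str.replace (PySem.Str.replace raw " " "") "," "").toList).dropWhile (· ≠ '3')).take 5 = ['3', '0', '9', '0', '*'] ∧ 5 < (((PySem.Str.replace (PySem.Str.replace raw " " "") "," "").toList).dropWhile (· ≠ '3')).length))
    (hd : ¬ ((((PySem.Str.replace (PySem.Str.replace raw " " "") "," "").toList).dropWhile (· ≠ '3')) = ['3', '0', '9', '0', '*'])) :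
    bodyA raw
    = decide (((((PySem.Str.replace (PySem.Str.replace raw " " "") "," "").toList).dropWhile (· ≠ '3'))).take 4 = ['3', '0', '9', '0']) := by
  simp only [bodyA]
  generalize hg : (PySem.Str.replace (PySem.Str.replace raw " " "") "," "").toList = l at hr hd ⊢
  rw [loopA_skip]
  cases ht : l.dropWhile (· ≠ '3') with
  | nil => simp [loopA]
  | cons c0 u =>
    rw [ht] at hr hd
    have hc0 : c0 = '3' := by
      have h2 := List.head?_dropWhile_not (fun x => x ≠ '3') l
      rw [ht] at h2; simpa using h2
    subst hc0
    simp only [loopA, show (PySem.Chars.upperChar '3' == '3') = true from rfl, if_true]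
    match u with
    | [] => simp [loopA]
    | c1 :: u1 =>
      by_cases hc1 : c1 = '0'
      case neg =>
        have : ¬ (PySem.Chars.upperChar c1 = '0') := by rw [upperChar_eq_iff c1 '0' (by decide)]; exact hc1
        simp [loopA, this, hc1]
      subst hc1
      simp only [loopA, show (PySem.Chars.upperChar '0' == '0') = true from rfl, if_true]
      match u1 with
      | [] => simp [loopA]
      | c2 :: u2 =>
        by_cases hc2 : c2 = '9'
        case neg =>
          have : ¬ (PySem.Chars.upperChar c2 = '9') := by rw [upperChar_eq_iff c2 '9' (by decide)]; exact hc2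
          simp [loopA, this, hc2]
        subst hc2
        simp only [loopA, show (PySem.Chars.upperChar '9' == '9') = true from rfl, if_true]
        match u2 with
        | [] => simp [loopA]
        | c3 :: u3 =>
          by_cases hc3 : c3 = '0'
          case neg =>
            have : ¬ (PySem.Chars.upperChar c3 = '0') := by rw [upperChar_eq_iff c3 '0' (by decide)]; exact hc3
            simp [loopA, this, hc3]
          subst hc3
          simp only [loopA, show (PySem.Chars.upperChar '0' == '0') = true from rfl, if_true]
          match u3 with
          | [] => simp [loopA]
          | c4 :: u4 =>
            by_cases hc4 : c4 = '*'
            case neg =>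
              have : ¬ (PySem.Chars.upperChar c4 = '*') := by rw [upperChar_eq_iff c4 '*' (by decide)]; exact hc4
              simp [loopA, this]
            subst hc4
            match u4 with
            | [] => exact absurd rfl hd
            | c5 :: u5 => exact absurd ⟨rfl, by simp⟩ hr

-- what B computes, as the same predicate
lemma B_eval (nome : String) :
    ((PySem.Str.find nome "3" != -1) &&
      (PySem.Str.slice nome (some (PySem.Str.find nome "3")) (some (PySem.Str.find nome "3" + 4)) == "3090"))
    = decide ((nome.toList.dropWhile (· ≠ '3')).take 4 = ['3', '0', '9', '0']) := by
  have hbeq : ∀ a b : String, (a == b) = decide (a.toList = b.toList) := by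
    intro a b; rw [Bool.eq_iff_iff]; simp [String.toList_inj]
  by_cases h3 : '3' ∈ nome.toList
  · have hfind : PySem.Str.find nome "3" = ((nome.toList.takeWhile (· ≠ '3')).length : Int) := by
      rw [PySem.Str.find_eq]
      exact find3_eq nome.toList h3
    set k := (nome.toList.takeWhile (· ≠ '3')).length with hk
    have hdropk : nome.toList.drop k = nome.toList.dropWhile (· ≠ '3') := by
      conv_lhs => rw [← List.takeWhile_append_dropWhile (p := (· ≠ '3')) (l := nome.toList)]
      rw [List.drop_left]
    have hslice : (PySem.Str.slice nome (some ((k : Int))) (some ((k : Int) + 4))).toList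
        = (nome.toList.dropWhile (· ≠ '3')).take 4 := by
      rw [PySem.Str.toList_slice]
      have := PySem.List.slice_natCast_add (xs := nome.toList) (j := k) (n := 4)
      simp only [PySem.Chars.slice_eq_listSlice]
      rw [show ((k : Int) + 4) = ((k : Int) + ((4 : Nat) : Int)) by norm_num] at *
      rw [this, hdropk]
    rw [hfind, hbeq, hslice]
    simp
  · have hfind : PySem.Str.find nome "3" = -1 := by
      rw [PySem.Str.find_eq]
      exact (PySem.Chars.find_eq_neg_one_iff _ _).mpr
        (fun hin => h3 ((List.singleton_infix_iff _ _).mp (by simpa using hin)))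
    have hdw : nome.toList.dropWhile (· ≠ '3') = [] := by
      rw [List.dropWhile_eq_nil_iff]
      intro x hx
      simp only [ne_eq, decide_eq_true_eq]
      intro he; exact h3 (he ▸ hx)
    rw [hfind, hdw]
    simp

lemma bodyB_eval (raw : String) :
    bodyB raw = decide (((((PySem.Str.replace (PySem.Str.replace raw " " "") "," "").toList).dropWhile (· ≠ '3'))).take 4 = ['3', '0', '9', '0']) := by
  simp only [bodyB]
  exact B_eval _

-- A returns False whenever the cleaned name from its first '3' on is exactly '3090*'
lemma bodyA_star (raw : String)
    (htail : (((PySem.Str.replace (PySem.Str.replace raw " " "") "," "").toList).dropWhile (· ≠ '3')) = ['3', '0', '9', '0', '*']) :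
    bodyA raw = false := by
  simp only [bodyA]
  rw [loopA_skip, htail]
  decide

-- ===== VERDICT (by name: the statement is the Claim_ definition above) =====
theorem check3090_spec : Claim_unchanged_check3090 := by
  intro data _ hpre hnd
  obtain ⟨hsome, hnr⟩ := hpre
  obtain ⟨raw, hq⟩ := Option.isSome_iff_exists.mp hsome
  unfold pvNome at hq
  simp only [pvNome, hq, Option.getD_some] at hnr
  unfold pvTail3 at hnr
  have hA : check3090 data = bodyA raw := by unfold check3090; rw [hq]
  have hB : check3090_alt data = bodyB raw := by unfold check3090_alt; rw [hq]
  have hnd' : ¬ (((PySem.Str.replace (PySem.Str.replace raw " " "") "," "").toList).dropWhile (· ≠ '3') = ['3', '0', '9', '0', '*']) := by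
    intro he; exact hnd ⟨by simp [pvNome, hq], by simp only [pvNome, hq, Option.getD_some, pvTail3]; exact he⟩
  rw [hA, hB, bodyB_eval, bodyA_result raw hnr hnd']

theorem check3090_changed : Claim_changed_check3090 := by
  unfold Claim_changed_check3090; decide

theorem check3090_tight : Claim_exact_check3090 := by
  intro data _ _ hd
  obtain ⟨hsome, htail⟩ := hd
  obtain ⟨raw, hq⟩ := Option.isSome_iff_exists.mp hsome
  unfold pvNome at hq
  simp only [pvNome, hq, Option.getD_some] at htail
  unfold pvTail3 at htail
  have hA : check3090 data = bodyA raw := by unfold check3090; rw [hq]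
  have hB : check3090_alt data = bodyB raw := by unfold check3090_alt; rw [hq]
  rw [hA, hB, bodyB_eval, bodyA_star raw htail, htail]
  decide
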